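-- pv_equiv track=rewrite | github.com/cma2015/iwa-miRNA | Source_code/modulei/scripts/db_page.py | getMatchedPositions
-- ===== SOURCE A (Python) =====
-- def getMatchedPositions( startPos, endPos, matchedStructList ):
--     RNALen = len(matchedStructList)
--     if( startPos < 0 ):
--         startPos = 0
--     if( endPos < 0 ):
--         endPos = endPos
--     if( startPos > RNALen ):
--         startPos = RNALen - 1
--     if( endPos > RNALen ):
--         endPos = RNALen - 1
--     if( startPos == 0 and endPos == 0 ):
--         return [0,0]
--     matchedPosList = []
--     for i in range(startPos, endPos):
--         curPos = matchedStructList[i]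
--         matchedPosList.append( curPos )
--     if( matchedPosList[0] == -1 ):
--         idx = 0
--         for i in range(len(matchedPosList)):
--             if( matchedPosList[i] != -1 ):
--                 idx = i
--                 break
--         matchedPos = matchedPosList[idx]
--         idxList = range(idx)
--         for i in idxList[::-1]:
--             matchedPos = matchedPos + 1
--             matchedPosList[i] = matchedPos
--     if( matchedPosList[-1] == -1 ):
--         idxList = range(len(matchedPosList))
--         idx = 0
--         for i in idxList[::-1]:
--             if( matchedPosList[i] != -1 ):
--                 idx = i
--                 break
--         #end for i
--         matchedPos =  matchedPosList[idx]
--         idx = idx + 1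
--         for i in range(idx, len(matchedPosList)):
--             matchedPos = matchedPos - 1
--             matchedPosList[i] = matchedPos
--     #end if
--     if( matchedPosList[0] < 0 ):
--         matchedPosList[0] = 0
--     if( matchedPosList[0] > RNALen ):
--         matchedPosList[0] = RNALen - 1
--     if( matchedPosList[-1] < 0 ):
--         matchedPosList[-1] = 0
--     if( matchedPosList[-1] > RNALen ):
--         matchedPosList[-1] = RNALen - 1
--     return [matchedPosList[0], matchedPosList[-1]]
-- ===== SOURCE B (Python) =====
-- def _mappedPos(xs, window, k):
--     """Mapped position of the window's k-th entry (k = 0 or -1), extrapolated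
--     from the nearest anchored (non -1) entry when that cell itself is
--     unmapped; -1 if nothing in the window is anchored."""
--     v = xs[window[k]]
--     if v != -1:
--         return v
--     if k == 0:
--         return next((xs[i] + j for j, i in enumerate(window) if xs[i] != -1), -1)
--     return next((xs[i] - j for j, i in enumerate(reversed(window)) if xs[i] != -1), -1)
--
--
-- def getMatchedPositions(startPos, endPos, matchedStructList):
--     L = len(matchedStructList)
--     s = 0 if startPos < 0 else (L - 1 if startPos > L else startPos)
--     e = L - 1 if endPos > L else endPos
--     if s == 0 and e == 0:
--         return [0, 0]
--     window = range(s, e)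
--     first = _mappedPos(matchedStructList, window, 0)
--     last = _mappedPos(matchedStructList, window, -1)
--
--     def clamp(x):
--         return 0 if x < 0 else (L - 1 if x > L else x)
--     return [clamp(first), clamp(last)]
-- ===== Notes on version B (the rewrite author's own statement) =====
-- stated objective: simpler
-- what changed: B never materializes the window's value list or simulates A's two in-place fill loops and per-cell clamps: a helper _mappedPos maps one end of the index window directly (return the cell's own value if anchored, otherwise one scan toward the other end yields nearest-anchor value plus/minus offset, or -1 when nothing is anchored), and the two results are clamped; Pre_ excludes the inputs whose clamped window is empty without hitting the startPos==endPos==0 early return, where both A and B raise IndexError.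
import Mathlib
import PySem

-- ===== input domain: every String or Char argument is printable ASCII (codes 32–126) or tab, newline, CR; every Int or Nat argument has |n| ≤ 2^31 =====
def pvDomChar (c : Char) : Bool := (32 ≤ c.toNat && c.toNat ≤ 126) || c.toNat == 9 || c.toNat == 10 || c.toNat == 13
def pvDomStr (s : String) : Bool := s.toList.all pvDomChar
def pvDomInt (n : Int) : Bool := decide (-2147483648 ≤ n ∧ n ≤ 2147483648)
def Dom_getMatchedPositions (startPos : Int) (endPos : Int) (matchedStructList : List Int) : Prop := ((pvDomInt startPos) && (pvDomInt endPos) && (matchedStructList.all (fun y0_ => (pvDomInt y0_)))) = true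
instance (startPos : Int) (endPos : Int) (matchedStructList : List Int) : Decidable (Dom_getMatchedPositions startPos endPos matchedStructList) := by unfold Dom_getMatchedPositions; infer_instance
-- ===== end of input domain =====

-- B maps each end of the index window directly: a helper extrapolates the position of the
-- window's first/last cell from the nearest anchored (non -1) entry; objective: simpler.

-- ===== PORT A =====
-- for i in idxList[::-1]: matchedPos += 1; matchedPosList[i] = matchedPos   (idxList = range(idx))
def aFillPrefix : List Int → Int → Nat → List Int
  | l, _, 0 => l
  | l, mp, i + 1 => aFillPrefix (l.set i (mp + 1)) (mp + 1) i

-- for i in range(idx, len): matchedPos -= 1; matchedPosList[i] = matchedPos   (c = len - idx iterations)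
def aFillSuffix : List Int → Int → Nat → Nat → List Int
  | l, _, _, 0 => l
  | l, mp, i, c + 1 => aFillSuffix (l.set i (mp - 1)) (mp - 1) (i + 1) c

-- if matchedPosList[0] == -1: forward scan for idx (default 0), then the backward fill
def aFirstPass (l : List Int) : List Int :=
  if (PySem.List.pyGet? l 0).getD 0 = -1 then
    let idx := (l.findIdx? (fun x => x != -1)).getD 0
    aFillPrefix l ((PySem.List.pyGet? l (idx : Int)).getD 0) idx
  else l

-- backward scan of the loop 'for i in idxList[::-1]: if matchedPosList[i] != -1: idx = i; break'
def aBackIdx (l : List Int) : Nat :=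
  match l.reverse.findIdx? (fun x => x != -1) with
  | some k => l.length - 1 - k
  | none => 0

-- if matchedPosList[-1] == -1: backward scan for idx (default 0), then the forward fill
def aSecondPass (l : List Int) : List Int :=
  if (PySem.List.pyGet? l (-1)).getD 0 = -1 then
    let idx := aBackIdx l
    aFillSuffix l ((PySem.List.pyGet? l (idx : Int)).getD 0) (idx + 1) (l.length - (idx + 1))
  else l

-- the four final clamps on matchedPosList[0] / matchedPosList[-1], then the returned pair
def aFinish (L : Int) (l : List Int) : List Int :=
  let l1 := if (PySem.List.pyGet? l 0).getD 0 < 0 then l.set 0 0 else l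
  let l2 := if (PySem.List.pyGet? l1 0).getD 0 > L then l1.set 0 (L - 1) else l1
  let l3 := if (PySem.List.pyGet? l2 (-1)).getD 0 < 0 then l2.set (l2.length - 1) 0 else l2
  let l4 := if (PySem.List.pyGet? l3 (-1)).getD 0 > L then l3.set (l3.length - 1) (L - 1) else l3
  [(PySem.List.pyGet? l4 0).getD 0, (PySem.List.pyGet? l4 (-1)).getD 0]

def getMatchedPositions (startPos : Int) (endPos : Int) (matchedStructList : List Int) : List Int :=
  let RNALen : Int := matchedStructList.length
  let s1 := if startPos < 0 then 0 else startPos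
  let s := if s1 > RNALen then RNALen - 1 else s1
  let e := if endPos > RNALen then RNALen - 1 else endPos
  if s = 0 ∧ e = 0 then [0, 0] else
  let mpl := (PySem.List.pyRange s e 1).foldl
      (fun acc i => acc ++ [(PySem.List.pyGet? matchedStructList i).getD 0]) []
  aFinish RNALen (aSecondPass (aFirstPass mpl))

-- ===== PORT B =====
def clampPos (L x : Int) : Int := if x < 0 then 0 else if x > L then L - 1 else x

def clampEnd (L x : Int) : Int := if x > L then L - 1 else x

-- next((xs[i] + j for j, i in enumerate(window) if xs[i] != -1), -1)
def bNextFwd (xs : List Int) : List Int → Nat → Int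
  | [], _ => -1
  | i :: rest, j =>
    if (PySem.List.pyGet? xs i).getD 0 ≠ -1 then (PySem.List.pyGet? xs i).getD 0 + (j : Int)
    else bNextFwd xs rest (j + 1)

-- next((xs[i] - j for j, i in enumerate(reversed(window)) if xs[i] != -1), -1)
def bNextRev (xs : List Int) : List Int → Nat → Int
  | [], _ => -1
  | i :: rest, j =>
    if (PySem.List.pyGet? xs i).getD 0 ≠ -1 then (PySem.List.pyGet? xs i).getD 0 - (j : Int)
    else bNextRev xs rest (j + 1)

-- _mappedPos(xs, window, k); xs[window[k]]: pyGet? = none is Python's IndexError on the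
-- empty window (those inputs are excluded by Pre_)
def bMapped (xs : List Int) (window : List Int) (k : Int) : Int :=
  if (PySem.List.pyGet? xs ((PySem.List.pyGet? window k).getD 0)).getD 0 ≠ -1 then
    (PySem.List.pyGet? xs ((PySem.List.pyGet? window k).getD 0)).getD 0
  else if k = 0 then bNextFwd xs window 0
  else bNextRev xs window.reverse 0

def getMatchedPositions_alt (startPos : Int) (endPos : Int) (matchedStructList : List Int) : List Int :=
  let L : Int := matchedStructList.length
  let s := clampPos L startPos
  let e := clampEnd L endPos
  if s = 0 ∧ e = 0 then [0, 0] else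
  let window := PySem.List.pyRange s e 1
  [clampPos L (bMapped matchedStructList window 0),
   clampPos L (bMapped matchedStructList window (-1))]

-- ===== PRECONDITION & SPEC =====
-- Pre_ excludes exactly the inputs whose clamped window is empty without hitting the
-- startPos==endPos==0 early return: there A's built list is empty and A raises IndexError.
def Pre_getMatchedPositions (startPos : Int) (endPos : Int) (matchedStructList : List Int) : Prop :=
  (clampPos (matchedStructList.length : Int) startPos = 0 ∧ clampEnd (matchedStructList.length : Int) endPos = 0) ∨
  (0 ≤ clampPos (matchedStructList.length : Int) startPos ∧
   clampPos (matchedStructList.length : Int) startPos < clampEnd (matchedStructList.length : Int) endPos)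

instance (startPos : Int) (endPos : Int) (matchedStructList : List Int) : Decidable (Pre_getMatchedPositions startPos endPos matchedStructList) := by unfold Pre_getMatchedPositions; infer_instance

def pvWitness_getMatchedPositions : Int × Int × List Int := (0, 3, [-1, 2, -1])

def Spec_getMatchedPositions (startPos : Int) (endPos : Int) (matchedStructList : List Int) (out : List Int) : Prop := out = getMatchedPositions_alt startPos endPos matchedStructList
instance (startPos : Int) (endPos : Int) (matchedStructList : List Int) (out : List Int) : Decidable (Spec_getMatchedPositions startPos endPos matchedStructList out) := by unfold Spec_getMatchedPositions; infer_instance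

-- ===== CLAIM (what is proved, stated in full; the proofs are below) =====
def Claim_equal_getMatchedPositions : Prop := ∀ (startPos : Int) (endPos : Int) (matchedStructList : List Int), Dom_getMatchedPositions startPos endPos matchedStructList → Pre_getMatchedPositions startPos endPos matchedStructList → Spec_getMatchedPositions startPos endPos matchedStructList (getMatchedPositions startPos endPos matchedStructList)

-- ===== LEMMAS AND PROOFS =====

/-- `(List.range m).map g`: the shape every intermediate list of A takes. -/
def rmap (m : Nat) (g : Nat → Int) : List Int := (List.range m).map g

-- window read: `wread xs s j` is what both ports read at window offset `j`
def wread (xs : List Int) (s : Int) (j : Nat) : Int := (PySem.List.pyGet? xs (s + (j : Int))).getD 0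

-- result shape of the first pass
def fpFun (m : Nat) (w : Nat → Int) : Nat → Int :=
  match (List.range m).findIdx? (fun i => w i != -1) with
  | none => w
  | some j0 => fun i => if i < j0 then w j0 + ((j0 : Int) - (i : Int)) else w i

-- result shape of the second pass (entered when u (m-1) = -1)
def spFun (m : Nat) (u : Nat → Int) : Nat → Int :=
  match (List.range m).reverse.findIdx? (fun i => u i != -1) with
  | none => fun i => if 1 ≤ i then (-1 : Int) - (i : Int) else u i
  | some k' => fun i => if m - 1 - k' + 1 ≤ i then u (m - 1 - k') - ((i : Int) - ((m - 1 - k' : Nat) : Int)) else u i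

theorem length_rmap (m : Nat) (g : Nat → Int) : (rmap m g).length = m := by simp [rmap]

theorem getElem_rmap (m : Nat) (g : Nat → Int) (i : Nat) (h : i < (rmap m g).length) :
    (rmap m g)[i] = g i := by simp [rmap]

theorem aFillPrefix_length : ∀ (idx : Nat) (l : List Int) (mp : Int),
    (aFillPrefix l mp idx).length = l.length := by
  intro idx
  induction idx with
  | zero => intro l mp; rfl
  | succ i ih => intro l mp; rw [aFillPrefix, ih]; simp

theorem aFillPrefix_getElem? : ∀ (idx : Nat) (l : List Int) (mp : Int) (i : Nat), i < l.length →
    (aFillPrefix l mp idx)[i]? =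
      some (if i < idx then mp + ((idx : Int) - (i : Int)) else l[i]!) := by
  intro idx
  induction idx with
  | zero =>
    intro l mp i hi
    simp [aFillPrefix, List.getElem!_eq_getElem?_getD, List.getElem?_eq_getElem hi]
  | succ idx ih =>
    intro l mp i hi
    have hi' : i < (l.set idx (mp + 1)).length := by simpa using hi
    rw [show aFillPrefix l mp (idx+1) = aFillPrefix (l.set idx (mp+1)) (mp+1) idx from rfl,
        ih (l.set idx (mp + 1)) (mp + 1) i hi']
    by_cases h1 : i < idx
    · have h2 : i < idx + 1 := by omega
      simp only [if_pos h1, if_pos h2, Option.some.injEq]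
      push_cast; ring
    · by_cases h2 : i = idx
      · subst h2
        have hlt : i < l.length := hi
        simp only [if_neg h1, if_pos (by omega : i < i + 1), Option.some.injEq]
        rw [List.getElem!_eq_getElem?_getD, List.getElem?_set]
        simp [hlt]
      · have h3 : ¬ i < idx + 1 := by omega
        simp only [if_neg h1, if_neg h3, Option.some.injEq]
        rw [List.getElem!_eq_getElem?_getD, List.getElem!_eq_getElem?_getD, List.getElem?_set,
            if_neg (by omega : ¬ idx = i)]

theorem aFillSuffix_length : ∀ (c : Nat) (l : List Int) (mp : Int) (i : Nat),
    (aFillSuffix l mp i c).length = l.length := by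
  intro c
  induction c with
  | zero => intro l mp i; rfl
  | succ c ih => intro l mp i; rw [aFillSuffix, ih]; simp

theorem aFillSuffix_getElem? : ∀ (c : Nat) (l : List Int) (mp : Int) (i t : Nat), t < l.length →
    (aFillSuffix l mp i c)[t]? =
      some (if i ≤ t ∧ t < i + c then mp - ((t : Int) - (i : Int) + 1) else l[t]!) := by
  intro c
  induction c with
  | zero =>
    intro l mp i t ht
    simp [aFillSuffix, List.getElem?_eq_getElem ht, List.getElem!_eq_getElem?_getD]
  | succ c ih =>
    intro l mp i t ht
    have ht' : t < (l.set i (mp - 1)).length := by simpa using ht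
    rw [show aFillSuffix l mp i (c+1) = aFillSuffix (l.set i (mp-1)) (mp-1) (i+1) c from rfl,
        ih (l.set i (mp - 1)) (mp - 1) (i + 1) t ht']
    by_cases h1 : i + 1 ≤ t ∧ t < i + 1 + c
    · have h2 : i ≤ t ∧ t < i + (c + 1) := by omega
      simp only [if_pos h1, if_pos h2, Option.some.injEq]
      push_cast; ring
    · by_cases h2 : t = i
      · subst h2
        have h3 : t ≤ t ∧ t < t + (c + 1) := by omega
        simp only [if_neg h1, if_pos h3, Option.some.injEq]
        rw [List.getElem!_eq_getElem?_getD, List.getElem?_set]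
        simp [ht]
      · have h3 : ¬ (i ≤ t ∧ t < i + (c + 1)) := by omega
        simp only [if_neg h1, if_neg h3, Option.some.injEq]
        rw [List.getElem!_eq_getElem?_getD, List.getElem!_eq_getElem?_getD, List.getElem?_set,
            if_neg (by omega : ¬ i = t)]

theorem rmap_getElem!_eq (m : Nat) (g : Nat → Int) (i : Nat) (h : i < m) :
    (rmap m g)[i]! = g i := by
  rw [List.getElem!_eq_getElem?_getD,
      List.getElem?_eq_getElem (by simpa [rmap] using h), getElem_rmap]
  rfl

theorem aFirstPass_rmap (m : Nat) (w : Nat → Int) (hm : 1 ≤ m) :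
    aFirstPass (rmap m w) = rmap m (fpFun m w) := by
  have h0 : 0 < (rmap m w).length := by simpa [rmap] using hm
  have hget0 : (PySem.List.pyGet? (rmap m w) 0).getD 0 = w 0 := by
    rw [PySem.List.pyGet?_zero, List.getElem?_eq_getElem h0, getElem_rmap]
    rfl
  have hfind : (rmap m w).findIdx? (fun x => x != -1) =
      (List.range m).findIdx? (fun i => w i != -1) := by
    rw [rmap, List.findIdx?_map]
    rfl
  by_cases hw0 : w 0 = -1
  · rw [aFirstPass, if_pos (by rw [hget0]; exact hw0)]
    cases hJ : (List.range m).findIdx? (fun i => w i != -1) with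
    | none =>
      simp only [hfind, hJ, Option.getD_none]
      show rmap m w = _
      unfold fpFun
      rw [hJ]
    | some j0 =>
      obtain ⟨hj1, hj2, hj3⟩ := List.findIdx?_eq_some_iff_getElem.mp hJ
      have hj0m : j0 < m := by simpa using hj1
      simp only [hfind, hJ, Option.getD_some]
      have hmp : (PySem.List.pyGet? (rmap m w) (j0 : Int)).getD 0 = w j0 := by
        rw [PySem.List.pyGet?_natCast,
            List.getElem?_eq_getElem (by simpa [rmap] using hj0m), getElem_rmap]
        rfl
      rw [hmp]
      apply List.ext_getElem?
      intro i
      by_cases hi : i < m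
      · rw [aFillPrefix_getElem? j0 (rmap m w) (w j0) i (by simpa [rmap] using hi),
            List.getElem?_eq_getElem (show i < (rmap m (fpFun m w)).length by simpa [rmap] using hi),
            getElem_rmap, rmap_getElem!_eq m w i hi]
        unfold fpFun
        rw [hJ]
      · rw [List.getElem?_eq_none (by rw [aFillPrefix_length]; simp [rmap]; omega),
            List.getElem?_eq_none (by simp [rmap]; omega)]
  · rw [aFirstPass, if_neg (by rw [hget0]; exact hw0)]
    have hJ : (List.range m).findIdx? (fun i => w i != -1) = some 0 := by
      rw [List.findIdx?_eq_some_iff_getElem]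
      refine ⟨by simpa using hm, by simpa [List.getElem_range] using hw0, fun j hj => by omega⟩
    unfold fpFun
    rw [hJ]
    simp [rmap]

theorem rmap_getLast (m : Nat) (u : Nat → Int) (hm : 1 ≤ m) :
    (PySem.List.pyGet? (rmap m u) (-1)).getD 0 = u (m - 1) := by
  rw [PySem.List.pyGet?_neg_one, List.getLast?_eq_getElem?, length_rmap,
      List.getElem?_eq_getElem (by simp [rmap]; omega), getElem_rmap]
  rfl

theorem rmap_rev_findIdx (m : Nat) (u : Nat → Int) :
    (rmap m u).reverse.findIdx? (fun x => x != -1) =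
      (List.range m).reverse.findIdx? (fun i => u i != -1) := by
  rw [rmap, ← List.map_reverse, List.findIdx?_map]
  rfl

theorem aSecondPass_rmap_ne (m : Nat) (u : Nat → Int) (hm : 1 ≤ m) (h : u (m - 1) ≠ -1) :
    aSecondPass (rmap m u) = rmap m u := by
  rw [aSecondPass, if_neg (by rw [rmap_getLast m u hm]; exact h)]

theorem aSecondPass_rmap_eq (m : Nat) (u : Nat → Int) (hm : 1 ≤ m) (h : u (m - 1) = -1) :
    aSecondPass (rmap m u) = rmap m (spFun m u) := by
  rw [aSecondPass, if_pos (by rw [rmap_getLast m u hm]; exact h)]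
  cases hK : (List.range m).reverse.findIdx? (fun i => u i != -1) with
  | none =>
    have hall : ∀ i, i < m → u i = -1 := by
      intro i hi
      have := List.findIdx?_eq_none_iff.mp hK i (by simpa using hi)
      simpa using this
    have hidx : aBackIdx (rmap m u) = 0 := by
      unfold aBackIdx
      rw [rmap_rev_findIdx m u, hK]
    simp only [hidx]
    have hmp : (PySem.List.pyGet? (rmap m u) ((0 : Nat) : Int)).getD 0 = -1 := by
      rw [PySem.List.pyGet?_natCast, List.getElem?_eq_getElem (by simpa [rmap] using hm),
          getElem_rmap]
      simpa using hall 0 hm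
    rw [hmp, length_rmap]
    apply List.ext_getElem?
    intro t
    by_cases ht : t < m
    · rw [aFillSuffix_getElem? (m - (0 + 1)) (rmap m u) (-1) (0 + 1) t (by simpa [rmap] using ht),
          List.getElem?_eq_getElem (show t < (rmap m (spFun m u)).length by simpa [rmap] using ht),
          getElem_rmap, rmap_getElem!_eq m u t ht]
      unfold spFun
      rw [hK]
      dsimp only
      by_cases h1 : 1 ≤ t
      · rw [if_pos (by omega), if_pos h1]
        push_cast; ring_nf
      · rw [if_neg (by omega), if_neg h1]
    · rw [List.getElem?_eq_none (by rw [aFillSuffix_length]; simp [rmap]; omega),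
          List.getElem?_eq_none (by simp [rmap]; omega)]
  | some k' =>
    obtain ⟨hk1, hk2, hk3⟩ := List.findIdx?_eq_some_iff_getElem.mp hK
    have hkm : k' < m := by simpa using hk1
    have hune : u (m - 1 - k') ≠ -1 := by
      have := hk2
      rw [List.getElem_reverse] at this
      simpa [List.getElem_range] using this
    have hidx : aBackIdx (rmap m u) = m - 1 - k' := by
      unfold aBackIdx
      rw [rmap_rev_findIdx m u, hK, length_rmap]
    simp only [hidx]
    have hmp : (PySem.List.pyGet? (rmap m u) ((m - 1 - k' : Nat) : Int)).getD 0 = u (m - 1 - k') := by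
      rw [PySem.List.pyGet?_natCast, List.getElem?_eq_getElem (by simp [rmap]; omega),
          getElem_rmap]
      rfl
    rw [hmp, length_rmap]
    apply List.ext_getElem?
    intro t
    by_cases ht : t < m
    · rw [aFillSuffix_getElem? (m - (m - 1 - k' + 1)) (rmap m u) (u (m - 1 - k')) (m - 1 - k' + 1) t
            (by simpa [rmap] using ht),
          List.getElem?_eq_getElem (show t < (rmap m (spFun m u)).length by simpa [rmap] using ht),
          getElem_rmap, rmap_getElem!_eq m u t ht]
      unfold spFun
      rw [hK]
      dsimp only
      by_cases h1 : m - 1 - k' + 1 ≤ t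
      · rw [if_pos (by omega), if_pos h1]
        have : ((m - 1 - k' + 1 : Nat) : Int) = ((m - 1 - k' : Nat) : Int) + 1 := by push_cast; ring
        rw [this]
        ring_nf
      · rw [if_neg (by omega), if_neg h1]
    · rw [List.getElem?_eq_none (by rw [aFillSuffix_length]; simp [rmap]; omega),
          List.getElem?_eq_none (by simp [rmap]; omega)]

theorem aFinish_ends (L x y : Int) (t : List Int) (hL : 1 ≤ L) :
    aFinish L ((x :: t) ++ [y]) = [clampPos L x, clampPos L y] := by
  have hget0 : ∀ (a b : Int) (tt : List Int),
      (PySem.List.pyGet? ((a :: tt) ++ [b]) 0).getD 0 = a := by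
    intro a b tt
    rw [List.cons_append, PySem.List.pyGet?_zero_cons]
    rfl
  have hgetl : ∀ (a b : Int) (tt : List Int),
      (PySem.List.pyGet? ((a :: tt) ++ [b]) (-1)).getD 0 = b := by
    intro a b tt
    rw [PySem.List.pyGet?_neg_one_append_singleton]
    rfl
  have hset0 : ∀ (a b v : Int) (tt : List Int),
      ((a :: tt) ++ [b]).set 0 v = (v :: tt) ++ [b] := by
    intro a b v tt
    simp
  have hlen : ∀ (a b : Int) (tt : List Int),
      ((a :: tt) ++ [b]).length - 1 = tt.length + 1 := by
    intro a b tt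
    simp
  have hsetl : ∀ (a b v : Int) (tt : List Int),
      ((a :: tt) ++ [b]).set (tt.length + 1) v = (a :: tt) ++ [v] := by
    intro a b v tt
    rw [List.set_append, if_neg (by simp)]
    simp
  simp only [aFinish, hget0]
  by_cases c1 : x < 0
  · simp only [if_pos c1, hset0, hget0]
    rw [if_neg (show ¬ (0 : Int) > L by omega)]
    simp only [hgetl, hlen, hsetl]
    by_cases c3 : y < 0
    · simp only [if_pos c3, hgetl, hlen, hsetl]
      rw [if_neg (show ¬ (0 : Int) > L by omega)]
      simp only [hget0, hgetl]
      simp [clampPos, c1, c3]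
    · simp only [if_neg c3, hgetl, hlen, hsetl]
      by_cases c4 : y > L
      · simp only [if_pos c4, hget0, hgetl]
        simp [clampPos, c1, c3, c4]
      · simp only [if_neg c4, hget0, hgetl]
        simp [clampPos, c1, c3, c4]
  · simp only [if_neg c1, hget0]
    by_cases c2 : x > L
    · simp only [if_pos c2, hset0, hgetl, hlen, hsetl]
      by_cases c3 : y < 0
      · simp only [if_pos c3, hgetl, hlen, hsetl]
        rw [if_neg (show ¬ (0 : Int) > L by omega)]
        simp only [hget0, hgetl]
        simp [clampPos, c1, c2, c3]
      · simp only [if_neg c3, hgetl, hlen, hsetl]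
        by_cases c4 : y > L
        · simp only [if_pos c4, hget0, hgetl]
          simp [clampPos, c1, c2, c3, c4]
        · simp only [if_neg c4, hget0, hgetl]
          simp [clampPos, c1, c2, c3, c4]
    · simp only [if_neg c2, hgetl, hlen, hsetl]
      by_cases c3 : y < 0
      · simp only [if_pos c3, hgetl, hlen, hsetl]
        rw [if_neg (show ¬ (0 : Int) > L by omega)]
        simp only [hget0, hgetl]
        simp [clampPos, c1, c2, c3]
      · simp only [if_neg c3, hgetl, hlen, hsetl]
        by_cases c4 : y > L
        · simp only [if_pos c4, hget0, hgetl]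
          simp [clampPos, c1, c2, c3, c4]
        · simp only [if_neg c4, hget0, hgetl]
          simp [clampPos, c1, c2, c3, c4]

theorem aFinish_singleton (L v : Int) (hL : 1 ≤ L) :
    aFinish L [v] = [clampPos L v, clampPos L v] := by
  have g0 : ∀ a : Int, (PySem.List.pyGet? [a] 0).getD 0 = a := by
    intro a
    rw [PySem.List.pyGet?_zero_cons]
    rfl
  have gl : ∀ a : Int, (PySem.List.pyGet? [a] (-1)).getD 0 = a := by
    intro a
    rw [PySem.List.pyGet?_neg_one]
    rfl
  have st : ∀ a v : Int, ([a] : List Int).set 0 v = [v] := by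
    intro a v
    rfl
  have hl : ∀ a : Int, ([a] : List Int).length - 1 = 0 := by
    intro a
    simp
  simp only [aFinish, g0]
  by_cases c1 : v < 0
  · simp only [if_pos c1, st, g0]
    rw [if_neg (show ¬ (0 : Int) > L by omega)]
    simp only [gl]
    rw [if_neg (show ¬ (0 : Int) < 0 by omega)]
    simp only [gl]
    rw [if_neg (show ¬ (0 : Int) > L by omega)]
    simp only [g0, gl]
    simp [clampPos, c1]
  · simp only [if_neg c1, g0]
    by_cases c2 : v > L
    · simp only [if_pos c2, st, gl]
      rw [if_neg (show ¬ L - 1 < 0 by omega)]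
      simp only [gl]
      rw [if_neg (show ¬ L - 1 > L by omega)]
      simp only [g0, gl]
      simp [clampPos, c1, c2]
    · simp only [if_neg c2, gl]
      rw [if_neg c1]
      simp only [gl]
      rw [if_neg c2]
      simp only [g0, gl]
      simp [clampPos, c1, c2]

theorem aFinish_rmap (m : Nat) (u : Nat → Int) (L : Int) (hm : 1 ≤ m) (hL : 1 ≤ L) :
    aFinish L (rmap m u) = [clampPos L (u 0), clampPos L (u (m - 1))] := by
  match m, hm with
  | 1, _ =>
    rw [show rmap 1 u = [u 0] by simp [rmap]]
    exact aFinish_singleton L (u 0) hL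
  | (k + 2), _ =>
    have hshape : rmap (k + 2) u =
        (u 0 :: (List.range k).map (fun i => u (i + 1))) ++ [u (k + 1)] := by
      rw [rmap, List.range_succ, List.range_succ_eq_map]
      simp [List.map_map]
    rw [hshape, aFinish_ends L (u 0) (u (k + 1)) _ hL]
    rfl

theorem build_eq (xs : List Int) (s e : Int) :
    (PySem.List.pyRange s e 1).foldl
      (fun acc i => acc ++ [(PySem.List.pyGet? xs i).getD 0]) [] =
    rmap ((e - s).toNat) (wread xs s) := by
  rw [PySem.List.foldl_append_singleton_eq_map, PySem.List.pyRange_one]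
  simp only [List.nil_append, List.map_map, rmap]
  rfl

def winL (cs : Int) (m : Nat) : List Int := (List.range m).map (fun k : Nat => (cs + k : Int))

theorem pyRange_winL (cs ce : Int) : PySem.List.pyRange cs ce 1 = winL cs (ce - cs).toNat := by
  rw [PySem.List.pyRange_one, winL]

theorem winL_length (cs : Int) (m : Nat) : (winL cs m).length = m := by simp [winL]

theorem winL_getD (cs : Int) (m t : Nat) (h : t < m) : (winL cs m).getD t 0 = cs + (t : Int) := by
  rw [List.getD_eq_getElem?_getD, winL, List.getElem?_map, List.getElem?_range h]
  rfl

theorem winL_rev_getD (cs : Int) (m t : Nat) (h : t < m) :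
    (winL cs m).reverse.getD t 0 = cs + ((m - 1 - t : Nat) : Int) := by
  have h1 : t < (winL cs m).length := by rw [winL_length]; omega
  rw [List.getD_eq_getElem?_getD, List.getElem?_reverse h1, winL_length,
      winL, List.getElem?_map, List.getElem?_range (by omega)]
  rfl

theorem mem_winL (cs : Int) (m : Nat) (i : Int) (h : i ∈ winL cs m) :
    ∃ k, k < m ∧ i = cs + (k : Int) := by
  simp only [winL, List.mem_map, List.mem_range] at h
  obtain ⟨k, hk, hi⟩ := h
  exact ⟨k, hk, hi.symm⟩

theorem bNextFwd_all (xs : List Int) : ∀ (l : List Int) (j : Nat),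
    (∀ i ∈ l, (PySem.List.pyGet? xs i).getD 0 = -1) → bNextFwd xs l j = -1 := by
  intro l
  induction l with
  | nil => intro j _; rfl
  | cons i rest ih =>
    intro j h
    rw [bNextFwd, if_neg (by simpa using h i (by simp))]
    exact ih (j + 1) fun x hx => h x (by simp [hx])

theorem bNextFwd_found (xs : List Int) : ∀ (l : List Int) (j t : Nat), t < l.length →
    (PySem.List.pyGet? xs (l.getD t 0)).getD 0 ≠ -1 →
    (∀ u, u < t → (PySem.List.pyGet? xs (l.getD u 0)).getD 0 = -1) →
    bNextFwd xs l j = (PySem.List.pyGet? xs (l.getD t 0)).getD 0 + ((j + t : Nat) : Int) := by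
  intro l
  induction l with
  | nil => intro j t ht; simp at ht
  | cons i rest ih =>
    intro j t ht hne hmin
    cases t with
    | zero =>
      rw [bNextFwd, if_pos (by simpa using hne)]
      simp
    | succ t' =>
      rw [bNextFwd, if_neg (by simpa using hmin 0 (by omega))]
      rw [ih (j + 1) t' (by simpa using ht) (by simpa using hne)
          (fun u hu => by simpa using hmin (u + 1) (by omega))]
      rw [show (i :: rest).getD (t' + 1) 0 = rest.getD t' 0 from rfl,
          show j + 1 + t' = j + (t' + 1) by omega]

theorem bNextRev_all (xs : List Int) : ∀ (l : List Int) (j : Nat),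
    (∀ i ∈ l, (PySem.List.pyGet? xs i).getD 0 = -1) → bNextRev xs l j = -1 := by
  intro l
  induction l with
  | nil => intro j _; rfl
  | cons i rest ih =>
    intro j h
    rw [bNextRev, if_neg (by simpa using h i (by simp))]
    exact ih (j + 1) fun x hx => h x (by simp [hx])

theorem bNextRev_found (xs : List Int) : ∀ (l : List Int) (j t : Nat), t < l.length →
    (PySem.List.pyGet? xs (l.getD t 0)).getD 0 ≠ -1 →
    (∀ u, u < t → (PySem.List.pyGet? xs (l.getD u 0)).getD 0 = -1) →
    bNextRev xs l j = (PySem.List.pyGet? xs (l.getD t 0)).getD 0 - ((j + t : Nat) : Int) := by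
  intro l
  induction l with
  | nil => intro j t ht; simp at ht
  | cons i rest ih =>
    intro j t ht hne hmin
    cases t with
    | zero =>
      rw [bNextRev, if_pos (by simpa using hne)]
      simp
    | succ t' =>
      rw [bNextRev, if_neg (by simpa using hmin 0 (by omega))]
      rw [ih (j + 1) t' (by simpa using ht) (by simpa using hne)
          (fun u hu => by simpa using hmin (u + 1) (by omega))]
      rw [show (i :: rest).getD (t' + 1) 0 = rest.getD t' 0 from rfl,
          show j + 1 + t' = j + (t' + 1) by omega]

theorem winL_get_zero (cs : Int) (m : Nat) (hm : 1 ≤ m) :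
    (PySem.List.pyGet? (winL cs m) 0).getD 0 = cs := by
  rw [PySem.List.pyGet?_zero, winL, List.getElem?_map, List.getElem?_range (by omega)]
  simp

theorem winL_get_last (cs : Int) (m : Nat) (hm : 1 ≤ m) :
    (PySem.List.pyGet? (winL cs m) (-1)).getD 0 = cs + ((m - 1 : Nat) : Int) := by
  rw [PySem.List.pyGet?_neg_one, List.getLast?_eq_getElem?, winL_length,
      winL, List.getElem?_map, List.getElem?_range (by omega)]
  rfl

-- ===== VERDICT (by name: the statement is the Claim_ definition above) =====
theorem getMatchedPositions_spec : Claim_equal_getMatchedPositions := by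
  intro sp ep xs _hdom hpre
  unfold Spec_getMatchedPositions
  unfold Pre_getMatchedPositions at hpre
  have hL0 : (0 : Int) ≤ (xs.length : Int) := Int.natCast_nonneg _
  have hsA : (if (if sp < 0 then 0 else sp) > (xs.length : Int) then (xs.length : Int) - 1
              else (if sp < 0 then 0 else sp)) = clampPos (xs.length : Int) sp := by
    simp only [clampPos]
    split_ifs <;> omega
  have heA : (if ep > (xs.length : Int) then (xs.length : Int) - 1 else ep) =
      clampEnd (xs.length : Int) ep := rfl
  simp only [getMatchedPositions, getMatchedPositions_alt]
  rw [hsA, heA]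
  by_cases hzero : clampPos (xs.length : Int) sp = 0 ∧ clampEnd (xs.length : Int) ep = 0
  · rw [if_pos hzero, if_pos hzero]
  · rw [if_neg hzero, if_neg hzero]
    obtain ⟨hcs0, hslt⟩ : 0 ≤ clampPos (xs.length : Int) sp ∧
        clampPos (xs.length : Int) sp < clampEnd (xs.length : Int) ep := hpre.resolve_left hzero
    have hceL : clampEnd (xs.length : Int) ep ≤ (xs.length : Int) := by
      unfold clampEnd
      split_ifs <;> omega
    have hL1 : (1 : Int) ≤ (xs.length : Int) := by omega
    set L : Int := (xs.length : Int)
    set cs : Int := clampPos L sp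
    set ce : Int := clampEnd L ep
    rw [build_eq xs cs ce, pyRange_winL cs ce]
    set m : Nat := (ce - cs).toNat with hmdef
    have hmm : (m : Int) = ce - cs := by omega
    have hm1 : 1 ≤ m := by omega
    have hq0v : (PySem.List.pyGet? xs ((PySem.List.pyGet? (winL cs m) 0).getD 0)).getD 0 =
        wread xs cs 0 := by
      rw [winL_get_zero cs m hm1]
      simp [wread]
    have hq1v : (PySem.List.pyGet? xs ((PySem.List.pyGet? (winL cs m) (-1)).getD 0)).getD 0 =
        wread xs cs (m - 1) := by
      rw [winL_get_last cs m hm1]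
      rfl
    rw [aFirstPass_rmap m (wread xs cs) hm1]
    cases hJ : (List.range m).findIdx? (fun i => wread xs cs i != -1) with
    | none =>
      have hall : ∀ i, i < m → wread xs cs i = -1 := by
        intro i hi
        have := List.findIdx?_eq_none_iff.mp hJ i (by simpa using hi)
        simpa using this
      have hfp : fpFun m (wread xs cs) = wread xs cs := by
        unfold fpFun
        rw [hJ]
      rw [hfp]
      rw [aSecondPass_rmap_eq m (wread xs cs) hm1 (hall (m - 1) (by omega))]
      have hK : (List.range m).reverse.findIdx? (fun i => wread xs cs i != -1) = none := by
        rw [List.findIdx?_eq_none_iff]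
        intro x hx
        simp only [List.mem_reverse, List.mem_range] at hx
        simpa using hall x hx
      have hv0 : spFun m (wread xs cs) 0 = -1 := by
        unfold spFun
        rw [hK]
        dsimp only
        rw [if_neg (by omega)]
        exact hall 0 (by omega)
      have hv1 : spFun m (wread xs cs) (m - 1) = -(m : Int) := by
        unfold spFun
        rw [hK]
        dsimp only
        by_cases h1 : 1 ≤ m - 1
        · rw [if_pos h1]
          omega
        · rw [if_neg h1]
          rw [hall (m - 1) (by omega)]
          omega
      have hBall : ∀ i ∈ winL cs m, (PySem.List.pyGet? xs i).getD 0 = -1 := by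
        intro i hi
        obtain ⟨k, hk, rfl⟩ := mem_winL cs m i hi
        exact hall k hk
      have hB0 : bMapped xs (winL cs m) 0 = -1 := by
        rw [bMapped, if_neg (by rw [hq0v, hall 0 (by omega)]; simp), if_pos rfl]
        exact bNextFwd_all xs _ 0 hBall
      have hB1 : bMapped xs (winL cs m) (-1) = -1 := by
        rw [bMapped, if_neg (by rw [hq1v, hall (m - 1) (by omega)]; simp),
            if_neg (by norm_num)]
        exact bNextRev_all xs _ 0 (fun i hi => hBall i (List.mem_reverse.mp hi))
      rw [aFinish_rmap m (spFun m (wread xs cs)) L hm1 hL1, hv0, hv1, hB0, hB1]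
      have c1 : clampPos L (-1) = 0 := by simp [clampPos]
      have c2 : clampPos L (-(m : Int)) = 0 := by
        simp only [clampPos]
        rw [if_pos (by omega)]
      rw [c1, c2]
    | some j0 =>
      obtain ⟨hj1, hj2, hj3⟩ := List.findIdx?_eq_some_iff_getElem.mp hJ
      have hj0m : j0 < m := by simpa using hj1
      have hwj0 : wread xs cs j0 ≠ -1 := by simpa [List.getElem_range] using hj2
      have hjmin : ∀ i, i < j0 → wread xs cs i = -1 := by
        intro i hi
        have := hj3 i (by simpa using hi)
        simpa [List.getElem_range] using this
      have hufun : ∀ i, fpFun m (wread xs cs) i =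
          if i < j0 then wread xs cs j0 + ((j0 : Int) - (i : Int)) else wread xs cs i := by
        intro i
        unfold fpFun
        rw [hJ]
      have hu0 : fpFun m (wread xs cs) 0 = wread xs cs j0 + (j0 : Int) := by
        rw [hufun 0]
        by_cases h : 0 < j0
        · rw [if_pos h]
          push_cast
          ring
        · rw [if_neg h]
          have : j0 = 0 := by omega
          rw [this]
          simp
      have hum : fpFun m (wread xs cs) (m - 1) = wread xs cs (m - 1) := by
        rw [hufun (m - 1), if_neg (by omega)]
      have hq0 : bMapped xs (winL cs m) 0 = wread xs cs j0 + (j0 : Int) := by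
        by_cases hw0 : wread xs cs 0 = -1
        · rw [bMapped, if_neg (by rw [hq0v, hw0]; simp), if_pos rfl]
          have := bNextFwd_found xs (winL cs m) 0 j0
            (by rw [winL_length]; exact hj0m)
            (by rw [winL_getD cs m j0 hj0m]; exact hwj0)
            (fun u hu => by rw [winL_getD cs m u (by omega)]; exact hjmin u hu)
          rw [this, winL_getD cs m j0 hj0m]
          simp [wread]
        · have hj00 : j0 = 0 := by
            by_contra hne0
            exact hw0 (hjmin 0 (by omega))
          subst hj00
          rw [bMapped, if_pos (by rw [hq0v]; exact hw0), hq0v]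
          simp
      by_cases hb : wread xs cs (m - 1) = -1
      · rw [aSecondPass_rmap_eq m (fpFun m (wread xs cs)) hm1 (by rw [hum]; exact hb)]
        cases hK : (List.range m).reverse.findIdx? (fun i => fpFun m (wread xs cs) i != -1) with
        | none =>
          exfalso
          have := List.findIdx?_eq_none_iff.mp hK j0 (by simp [hj0m])
          rw [hufun j0, if_neg (by omega)] at this
          simp at this
          exact hwj0 this
        | some k' =>
          obtain ⟨hk1, hk2, hk3⟩ := List.findIdx?_eq_some_iff_getElem.mp hK
          have hkm : k' < m := by simpa using hk1
          have hk2' : fpFun m (wread xs cs) (m - 1 - k') ≠ -1 := by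
            rw [List.getElem_reverse] at hk2
            simpa [List.getElem_range] using hk2
          have hk3' : ∀ jj, jj < k' → fpFun m (wread xs cs) (m - 1 - jj) = -1 := by
            intro jj hjj
            have := hk3 jj (by simpa using hjj)
            rw [List.getElem_reverse] at this
            simpa [List.getElem_range] using this
          have hjq : j0 ≤ m - 1 - k' := by
            by_contra hlt
            rw [Nat.not_le] at hlt
            have hjj : m - 1 - j0 < k' := by omega
            have := hk3' (m - 1 - j0) hjj
            rw [show m - 1 - (m - 1 - j0) = j0 by omega] at this
            rw [hufun j0, if_neg (by omega)] at this
            exact hwj0 this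
          have huq : fpFun m (wread xs cs) (m - 1 - k') = wread xs cs (m - 1 - k') := by
            rw [hufun (m - 1 - k'), if_neg (by omega)]
          have hwq : wread xs cs (m - 1 - k') ≠ -1 := by
            rw [← huq]
            exact hk2'
          have hqm : m - 1 - k' < m - 1 := by
            have hne : m - 1 - k' ≠ m - 1 := by
              intro hEq
              rw [hEq, hum] at hk2'
              exact hk2' hb
            omega
          have htail : ∀ i, m - 1 - k' < i → i < m → wread xs cs i = -1 := by
            intro i hqi him
            have hjj : m - 1 - i < k' := by omega
            have := hk3' (m - 1 - i) hjj
            rw [show m - 1 - (m - 1 - i) = i by omega] at this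
            rwa [hufun i, if_neg (by omega)] at this
          have hv0 : spFun m (fpFun m (wread xs cs)) 0 = fpFun m (wread xs cs) 0 := by
            unfold spFun
            rw [hK]
            dsimp only
            rw [if_neg (by omega)]
          have hv1 : spFun m (fpFun m (wread xs cs)) (m - 1) =
              wread xs cs (m - 1 - k') - (((m - 1 : Nat) : Int) - ((m - 1 - k' : Nat) : Int)) := by
            unfold spFun
            rw [hK]
            dsimp only
            rw [if_pos (by omega), huq]
          have hq1 : bMapped xs (winL cs m) (-1) = wread xs cs (m - 1 - k') - (k' : Int) := by
            rw [bMapped, if_neg (by rw [hq1v, hb]; simp), if_neg (by norm_num)]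
            have := bNextRev_found xs (winL cs m).reverse 0 k'
              (by rw [List.length_reverse, winL_length]; exact hkm)
              (by rw [winL_rev_getD cs m k' hkm]; exact hwq)
              (fun u hu => by
                rw [winL_rev_getD cs m u (by omega)]
                exact htail (m - 1 - u) (by omega) (by omega))
            rw [this, winL_rev_getD cs m k' hkm]
            simp [wread]
          rw [aFinish_rmap m (spFun m (fpFun m (wread xs cs))) L hm1 hL1, hv0, hu0, hv1,
              hq0, hq1]
          have h2 : (((m - 1 : Nat) : Int) - ((m - 1 - k' : Nat) : Int)) = (k' : Int) := by
            omega
          rw [h2]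
      · rw [aSecondPass_rmap_ne m (fpFun m (wread xs cs)) hm1 (by rw [hum]; exact hb)]
        have hq1 : bMapped xs (winL cs m) (-1) = wread xs cs (m - 1) := by
          rw [bMapped, if_pos (by rw [hq1v]; exact hb), hq1v]
        rw [aFinish_rmap m (fpFun m (wread xs cs)) L hm1 hL1, hu0, hum, hq0, hq1]
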